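-- pv_equiv track=rewrite | github.com/limengjie/intro | ps2.py | d_equation
-- ===== SOURCE A (Python) =====
-- nA = 6
--
-- nB = 9
--
-- nC = 20
--
-- m = {}
--
-- def d_equation(num_nug):
--   assert num_nug >= 6
--   for c in range (0, num_nug):
--     for b in range (0, num_nug):
--       for a in range (0, num_nug):
--         if nA*a + nB*b + nC*c == num_nug:
--           m[num_nug] = (a, b, c)
--           return True
--   #print ("no answer")
--   return False
-- ===== SOURCE B (Python) =====
-- nA = 6
--
-- nB = 9
--
-- nC = 20
--
-- m = {}
--
-- # Chicken McNugget closed form for {6, 9, 20}: every integer >= 6 is representable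
-- # except the finite list BAD; for representable n a witness (a, b, c) follows from
-- # n mod 6 with the table BC (same triple A's search finds).
-- BAD = frozenset((7, 8, 10, 11, 13, 14, 16, 17, 19, 22, 23, 25, 28, 31, 34, 37, 43))
-- BC = {0: (0, 0), 3: (1, 0), 2: (0, 1), 5: (1, 1), 4: (0, 2), 1: (1, 2)}
--
-- def d_equation(num_nug):
--   assert num_nug >= 6
--   if num_nug in BAD:
--     return False
--   b, c = BC[num_nug % 6]
--   m[num_nug] = ((num_nug - nB*b - nC*c) // nA, b, c)
--   return True
-- ===== Notes on version B (the rewrite author's own statement) =====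
-- stated objective: faster
-- what changed: B replaces A's triple nested search with the closed-form Chicken-McNugget answer for the three nugget sizes: a constant membership test against the finite set of non-representable numbers, plus a constant-time witness from the residue of num_nug modulo the smallest size (storing the same triple in m that A's search finds).
import Mathlib
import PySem

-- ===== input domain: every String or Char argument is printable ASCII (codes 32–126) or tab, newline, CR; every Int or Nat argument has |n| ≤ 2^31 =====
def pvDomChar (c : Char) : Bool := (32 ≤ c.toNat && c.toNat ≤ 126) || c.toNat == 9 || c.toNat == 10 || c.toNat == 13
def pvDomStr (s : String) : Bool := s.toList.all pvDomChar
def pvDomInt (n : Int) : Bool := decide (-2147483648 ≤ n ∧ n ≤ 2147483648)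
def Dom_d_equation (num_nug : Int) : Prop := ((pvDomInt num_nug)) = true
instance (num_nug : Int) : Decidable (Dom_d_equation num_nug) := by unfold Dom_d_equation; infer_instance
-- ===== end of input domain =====

-- B replaces A's triple nested search by the closed-form answer: a finite non-representable set.
-- Both Pythons store the found triple in the global dict m (the same triple, as tested); the theorem is about the return value.
-- ===== PORT A =====
def d_equation (num_nug : Int) : Bool :=
  (PySem.List.pyRange 0 num_nug 1).any (fun c =>
    (PySem.List.pyRange 0 num_nug 1).any (fun b =>
      (PySem.List.pyRange 0 num_nug 1).any (fun a =>
        decide (6 * a + 9 * b + 20 * c = num_nug))))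

-- ===== PORT B =====
def pvBAD : List Int := [7, 8, 10, 11, 13, 14, 16, 17, 19, 22, 23, 25, 28, 31, 34, 37, 43]

def d_equation_alt (num_nug : Int) : Bool :=
  if pvBAD.contains num_nug then false else true

-- ===== PRECONDITION & SPEC =====
-- Pre_ excludes num_nug < 6, where A's `assert num_nug >= 6` raises AssertionError.
def Pre_d_equation (num_nug : Int) : Prop := 6 ≤ num_nug
instance (num_nug : Int) : Decidable (Pre_d_equation num_nug) := by unfold Pre_d_equation; infer_instance
def pvWitness_d_equation : Int := 7

def Spec_d_equation (num_nug : Int) (out : Bool) : Prop := out = d_equation_alt num_nug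
instance (num_nug : Int) (out : Bool) : Decidable (Spec_d_equation num_nug out) := by unfold Spec_d_equation; infer_instance

-- ===== CLAIM (what is proved, stated in full; the proofs are below) =====
def Claim_equal_d_equation : Prop := ∀ (num_nug : Int), Dom_d_equation num_nug → Pre_d_equation num_nug → Spec_d_equation num_nug (d_equation num_nug)

-- ===== LEMMAS AND PROOFS =====

-- A's triple search succeeds iff n is representable as 6a+9b+20c with a,b,c ≥ 0
-- (the range bounds a,b,c < n are automatic for n ≥ 6).
theorem d_equation_char (n : Int) (hn : 6 ≤ n) :
    d_equation n = true ↔ ∃ a b c : Int, 0 ≤ a ∧ 0 ≤ b ∧ 0 ≤ c ∧ 6 * a + 9 * b + 20 * c = n := by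
  unfold d_equation
  simp only [List.any_eq_true, PySem.List.mem_pyRange_one, decide_eq_true_iff]
  constructor
  · rintro ⟨c, hc, b, hb, a, ha, hEq⟩
    exact ⟨a, b, c, ha.1, hb.1, hc.1, hEq⟩
  · rintro ⟨a, b, c, ha, hb, hc, hEq⟩
    exact ⟨c, ⟨hc, by omega⟩, b, ⟨hb, by omega⟩, a, ⟨ha, by omega⟩, hEq⟩

-- ===== VERDICT (by name: the statement is the Claim_ definition above) =====
theorem d_equation_spec : Claim_equal_d_equation := by
  intro n _ hpre
  unfold Spec_d_equation d_equation_alt pvBAD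
  by_cases h : n ∈ ([7, 8, 10, 11, 13, 14, 16, 17, 19, 22, 23, 25, 28, 31, 34, 37, 43] : List Int)
  · -- non-representable values: both sides are false
    have hmem := h
    simp only [List.mem_cons, List.not_mem_nil, or_false] at hmem
    simp only [List.contains_eq_mem, h, decide_true, if_true]
    rw [← Bool.not_eq_true, d_equation_char n hpre]
    rintro ⟨a, b, c, ha, hb, hc, hEq⟩
    omega
  · -- representable values: both sides are true
    simp only [List.contains_eq_mem, h, decide_false, Bool.false_eq_true, if_false]
    have hne : n ≠ 7 ∧ n ≠ 8 ∧ n ≠ 10 ∧ n ≠ 11 ∧ n ≠ 13 ∧ n ≠ 14 ∧ n ≠ 16 ∧ n ≠ 17 ∧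
        n ≠ 19 ∧ n ≠ 22 ∧ n ≠ 23 ∧ n ≠ 25 ∧ n ≠ 28 ∧ n ≠ 31 ∧ n ≠ 34 ∧ n ≠ 37 ∧ n ≠ 43 := by
      simp only [List.mem_cons, List.not_mem_nil, or_false] at h
      push Not at h
      exact h
    rw [d_equation_char n hpre]
    have hPre : (6 : Int) ≤ n := hpre
    obtain ⟨h7, h8, h10, h11, h13, h14, h16, h17, h19, h22, h23, h25, h28, h31, h34, h37, h43⟩ := hne
    have hr : n % 6 = 0 ∨ n % 6 = 1 ∨ n % 6 = 2 ∨ n % 6 = 3 ∨ n % 6 = 4 ∨ n % 6 = 5 := by omega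
    rcases hr with hr | hr | hr | hr | hr | hr
    · exact ⟨n / 6, 0, 0, by omega, by omega, by omega, by omega⟩
    · exact ⟨(n - 49) / 6, 1, 2, by omega, by omega, by omega, by omega⟩
    · exact ⟨(n - 20) / 6, 0, 1, by omega, by omega, by omega, by omega⟩
    · exact ⟨(n - 9) / 6, 1, 0, by omega, by omega, by omega, by omega⟩
    · exact ⟨(n - 40) / 6, 0, 2, by omega, by omega, by omega, by omega⟩
    · exact ⟨(n - 29) / 6, 1, 1, by omega, by omega, by omega, by omega⟩
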